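-- pv_equiv track=rewrite | github.com/dhkang184/code_QA | 취업스터디/프로그래머스_거리두기.py | check_p
-- ===== SOURCE A (Python) =====
-- def check_p(place):
--     persons = []
--     for r in range(len(place)):
--         for c in range(len(place[0])):
--             if place[r][c] == 'P':
--                 persons.append((r,c))
--     for p_idx in range(len(persons)):
--         for check_p in range(p_idx+1, len(persons)):
--             r1 = persons[p_idx][0]
--             c1 = persons[p_idx][1]
--             r2 = persons[check_p][0]
--             c2 = persons[check_p][1]
--             if abs(r1- r2) + abs(c1-c2) <=2:
--                 if r1 == r2:
--                     pass_v = True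
--                     for n_c in range(min(c1,c2), max(c1,c2)):
--                         if place[r1][n_c] == 'X':
--                             pass_v = False
--                     if pass_v:
--                         return 0
--                 elif c1 == c2:
--                     pass_v = True
--                     for n_r in range(min(r1,r2), max(r1,r2)):
--                         if place[n_r][c1] == 'X':
--                             pass_v =False
--                     if pass_v:
--                         return 0
--                 else:
--                     delta_r = r2- r1
--                     delta_c = c2 -c1
--                     if place[r1][c2] == 'O' or place[r2][c1] =='O':
--                         return 0
--     return 1
-- ===== SOURCE B (Python) =====
-- def check_p(place):
--     # One streaming pass: per row build the set of P columns, probe only the six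
--     # backward offsets within Manhattan distance 2, keep a two-row window,
--     # return at the first violation.
--     w = len(place[0]) if place else 0
--     upp, up = set(), set()  # P columns two rows up / one row up
--     for r, row in enumerate(place):
--         cur = {c for c in range(w) if row[c] == 'P'}
--         for c in cur:
--             if c - 1 in cur:
--                 return 0
--             if c - 2 in cur and row[c - 1] != 'X':
--                 return 0
--             if c in up:
--                 return 0
--             if c in upp and place[r - 1][c] != 'X':
--                 return 0
--             if c - 1 in up and (row[c - 1] == 'O' or place[r - 1][c] == 'O'):
--                 return 0
--             if c + 1 in up and (row[c + 1] == 'O' or place[r - 1][c] == 'O'):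
--                 return 0
--         upp, up = up, cur
--     return 1
-- ===== Notes on version B (the rewrite author's own statement) =====
-- stated objective: alternative
-- what changed: Replaced A's collect-all-persons-then-O(p^2) pairwise scan by a single streaming pass over the rows that keeps a two-row window of P-column sets and probes only the six backward offsets within Manhattan distance 2 per person, returning at the first violation.
import Mathlib
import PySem

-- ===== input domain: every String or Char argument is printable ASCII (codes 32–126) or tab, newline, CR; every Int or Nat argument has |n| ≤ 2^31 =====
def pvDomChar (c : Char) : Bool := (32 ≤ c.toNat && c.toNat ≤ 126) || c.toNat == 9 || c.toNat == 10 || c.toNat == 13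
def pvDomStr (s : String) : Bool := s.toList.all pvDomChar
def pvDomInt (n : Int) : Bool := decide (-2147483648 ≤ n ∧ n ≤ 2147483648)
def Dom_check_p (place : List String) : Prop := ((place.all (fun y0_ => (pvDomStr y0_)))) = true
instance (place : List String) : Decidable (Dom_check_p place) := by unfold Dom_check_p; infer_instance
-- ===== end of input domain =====

-- B replaces A's collect-then-pairwise scan by one streaming pass keeping a
-- two-row window of P-column sets and probing six backward offsets per person
-- (objective: alternative).

-- shared cell accessor: place[r][c] (the defaults are never reached under Pre_)
def pvCell (place : List String) (r c : Int) : Char :=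
  PySem.List.pyGetD (PySem.List.pyGetD place r "").toList c ' '

-- ===== PORT A =====
def pvPersons (place : List String) : List (Int × Int) :=
  (PySem.List.pyRange 0 place.length 1).foldl (fun acc r =>
    (PySem.List.pyRange 0 ((PySem.List.pyGetD place 0 "").length : Int) 1).foldl (fun acc2 c =>
      if pvCell place r c == 'P' then acc2 ++ [(r, c)] else acc2) acc) []

def pvViol (place : List String) (p q : Int × Int) : Bool :=
  if (p.1 - q.1).natAbs + (p.2 - q.2).natAbs ≤ 2 then
    if p.1 = q.1 then
      (PySem.List.pyRange (min p.2 q.2) (max p.2 q.2) 1).foldl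
        (fun pv n_c => if pvCell place p.1 n_c = 'X' then false else pv) true
    else if p.2 = q.2 then
      (PySem.List.pyRange (min p.1 q.1) (max p.1 q.1) 1).foldl
        (fun pv n_r => if pvCell place n_r p.2 = 'X' then false else pv) true
    else
      pvCell place p.1 q.2 = 'O' || pvCell place q.1 p.2 = 'O'
  else false

def check_p (place : List String) : Int :=
  if (PySem.List.pyRange 0 ((pvPersons place).length : Int) 1).any (fun i =>
      (PySem.List.pyRange (i + 1) ((pvPersons place).length : Int) 1).any (fun j =>
        pvViol place (PySem.List.pyGetD (pvPersons place) i (0, 0))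
          (PySem.List.pyGetD (pvPersons place) j (0, 0))))
  then 0 else 1

-- ===== PORT B =====
def pvRowSet (w : Int) (row : String) : PySem.Set Int :=
  PySem.Set.ofList ((PySem.List.pyRange 0 w 1).filter
    (fun c => PySem.List.pyGetD row.toList c ' ' == 'P'))

def pvHit (place : List String) (r : Int) (row : String)
    (cur up upp : List Int) (c : Int) : Bool :=
  cur.contains (c - 1) ||
  (cur.contains (c - 2) && !(PySem.List.pyGetD row.toList (c - 1) ' ' = 'X')) ||
  up.contains c ||
  (upp.contains c && !(pvCell place (r - 1) c = 'X')) ||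
  (up.contains (c - 1) &&
    (PySem.List.pyGetD row.toList (c - 1) ' ' = 'O' || pvCell place (r - 1) c = 'O')) ||
  (up.contains (c + 1) &&
    (PySem.List.pyGetD row.toList (c + 1) ' ' = 'O' || pvCell place (r - 1) c = 'O'))

def pvScan (place : List String) (w : Int) (upp up : List Int) (r : Int) :
    List String → Bool
  | [] => false
  | row :: rest =>
    let cur := pvRowSet w row
    if cur.any (fun c => pvHit place r row cur up upp c) then true
    else pvScan place w up cur (r + 1) rest

def check_p_alt (place : List String) : Int :=
  if pvScan place ((place.headD "").length : Int) [] [] 0 place then 0 else 1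

-- ===== PRECONDITION & SPEC =====
-- Pre_ excludes exactly the ragged grids where some row is shorter than row 0,
-- on which the Python A raises IndexError while scanning columns 0..len(place[0])-1.
def Pre_check_p (place : List String) : Prop :=
  ∀ s ∈ place, (place.headD "").length ≤ s.length
instance (place : List String) : Decidable (Pre_check_p place) := by
  unfold Pre_check_p; infer_instance

def pvWitness_check_p : List String := ["POP", "OXO", "PXP"]

def Spec_check_p (place : List String) (out : Int) : Prop := out = check_p_alt place
instance (place : List String) (out : Int) : Decidable (Spec_check_p place out) := by
  unfold Spec_check_p; infer_instance

-- ===== CLAIM (what is proved, stated in full; the proofs are below) =====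
def Claim_equal_check_p : Prop :=
  ∀ (place : List String), Dom_check_p place → Pre_check_p place →
    Spec_check_p place (check_p place)

-- ===== LEMMAS AND PROOFS =====

-- row-major lexicographic order on positions, the order in which A's scan emits persons
def pvLex (p q : Int × Int) : Prop := p.1 < q.1 ∨ (p.1 = q.1 ∧ p.2 < q.2)

-- the row-major list of P cells that A's scan produces
def pvCells (place : List String) : List (Int × Int) :=
  (PySem.List.pyRange 0 (place.length : Int) 1).flatMap (fun r =>
    ((PySem.List.pyRange 0 ((PySem.List.pyGetD place 0 "").length : Int) 1).filter
      (fun c => pvCell place r c == 'P')).map (fun c => (r, c)))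

-- the set of P columns of row r (as B computes it), with width parameter W
def pvRS (place : List String) (W r : Int) : List Int :=
  (PySem.List.pyRange 0 W 1).filter (fun c => pvCell place r c == 'P')

-- guarded version: what B's rolling window holds before row 0
def pvRSg (place : List String) (W r : Int) : List Int :=
  if 0 ≤ r then pvRS place W r else []

-- B's per-person probe, as a proposition about row sets
def pvHitP (place : List String) (W r c : Int) : Prop :=
  (c - 1) ∈ pvRS place W r ∨
  ((c - 2) ∈ pvRS place W r ∧ ¬ pvCell place r (c - 1) = 'X') ∨
  c ∈ pvRSg place W (r - 1) ∨
  (c ∈ pvRSg place W (r - 2) ∧ ¬ pvCell place (r - 1) c = 'X') ∨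
  ((c - 1) ∈ pvRSg place W (r - 1) ∧
    (pvCell place r (c - 1) = 'O' ∨ pvCell place (r - 1) c = 'O')) ∨
  ((c + 1) ∈ pvRSg place W (r - 1) ∧
    (pvCell place r (c + 1) = 'O' ∨ pvCell place (r - 1) c = 'O'))

def pvRowViol (place : List String) (W r : Int) : Prop :=
  ∃ c ∈ pvRS place W r, pvHitP place W r c

theorem pvPersons_eq_cells (place : List String) : pvPersons place = pvCells place := by
  unfold pvPersons pvCells
  simp only [PySem.List.foldl_append_if]
  rw [PySem.List.foldl_append_eq_flatMap]
  simp

theorem pvCells_pairwise (place : List String) : (pvCells place).Pairwise pvLex := by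
  unfold pvCells
  rw [List.pairwise_flatMap]
  refine ⟨?_, ?_⟩
  · intro a _
    rw [List.pairwise_map]
    exact ((PySem.List.pairwise_lt_pyRange_one 0 _).filter _).imp
      (fun h => Or.inr ⟨rfl, h⟩)
  · exact (PySem.List.pairwise_lt_pyRange_one 0 _).imp
      (fun {a b} hab x hx y hy => by
        simp only [List.mem_map] at hx hy
        obtain ⟨cx, _, rfl⟩ := hx
        obtain ⟨cy, _, rfl⟩ := hy
        exact Or.inl hab)

theorem mem_pvRS (place : List String) (W r c : Int) :
    c ∈ pvRS place W r ↔ 0 ≤ c ∧ c < W ∧ pvCell place r c = 'P' := by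
  unfold pvRS
  simp [List.mem_filter, PySem.List.mem_pyRange_one, and_assoc]

theorem pvCells_mem (place : List String) (r c : Int) :
    (r, c) ∈ pvCells place ↔
      0 ≤ r ∧ r < (place.length : Int) ∧
        c ∈ pvRS place ((PySem.List.pyGetD place 0 "").length : Int) r := by
  unfold pvCells pvRS
  simp only [List.mem_flatMap, List.mem_map, List.mem_filter, PySem.List.mem_pyRange_one,
    beq_iff_eq]
  constructor
  · rintro ⟨a, ⟨ha0, ha1⟩, b, ⟨⟨hb0, hb1⟩, hPb⟩, heq⟩
    injection heq with h1 h2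
    subst h1; subst h2
    exact ⟨ha0, ha1, ⟨⟨hb0, hb1⟩, hPb⟩⟩
  · rintro ⟨h1, h2, ⟨⟨h3, h4⟩, h5⟩⟩
    exact ⟨r, ⟨h1, h2⟩, c, ⟨⟨h3, h4⟩, h5⟩, rfl⟩

theorem pvCell_high (place : List String) (r c : Int)
    (h : (place.length : Int) ≤ r) : pvCell place r c = ' ' := by
  unfold pvCell
  have h0 : PySem.List.pyGetD place r "" = "" := by
    apply PySem.List.pyGetD_of_none
    rw [PySem.List.pyGet?_eq_none_iff]
    simp only [PySem.Raise.InRange]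
    omega
  rw [h0, show String.toList "" = [] from rfl]
  apply PySem.List.pyGetD_of_none
  rw [PySem.List.pyGet?_eq_none_iff]
  simp only [PySem.Raise.InRange, List.length_nil]
  omega

-- evaluations of A's pair check at each of the six forward offsets
theorem pvViol_row1 (place : List String) (r c : Int) (hP : pvCell place r c = 'P') :
    pvViol place (r, c) (r, c + 1) = true := by
  dsimp only [pvViol]
  rw [if_pos (show (r - r).natAbs + (c - (c + 1)).natAbs ≤ 2 by omega), if_pos rfl]
  rw [show min c (c + 1) = c by omega, show max c (c + 1) = c + 1 by omega,
    PySem.List.pyRange_one_cons (by omega), PySem.List.pyRange_one_eq_nil (by omega)]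
  simp [hP]

theorem pvViol_row2 (place : List String) (r c : Int) (hP : pvCell place r c = 'P') :
    pvViol place (r, c) (r, c + 2) = true ↔ ¬ pvCell place r (c + 1) = 'X' := by
  dsimp only [pvViol]
  rw [if_pos (show (r - r).natAbs + (c - (c + 2)).natAbs ≤ 2 by omega), if_pos rfl]
  rw [show min c (c + 2) = c by omega, show max c (c + 2) = c + 2 by omega,
    PySem.List.pyRange_one_cons (by omega), PySem.List.pyRange_one_cons (by omega),
    PySem.List.pyRange_one_eq_nil (show (c + 2 : Int) ≤ c + 1 + 1 by omega)]
  by_cases hx : pvCell place r (c + 1) = 'X' <;> simp [hx, hP]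

theorem pvViol_col1 (place : List String) (r c : Int) (hP : pvCell place r c = 'P') :
    pvViol place (r, c) (r + 1, c) = true := by
  dsimp only [pvViol]
  rw [if_pos (show (r - (r + 1)).natAbs + (c - c).natAbs ≤ 2 by omega),
    if_neg (show ¬(r = r + 1) by omega), if_pos rfl]
  rw [show min r (r + 1) = r by omega, show max r (r + 1) = r + 1 by omega,
    PySem.List.pyRange_one_cons (by omega), PySem.List.pyRange_one_eq_nil (by omega)]
  simp [hP]

theorem pvViol_col2 (place : List String) (r c : Int) (hP : pvCell place r c = 'P') :
    pvViol place (r, c) (r + 2, c) = true ↔ ¬ pvCell place (r + 1) c = 'X' := by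
  dsimp only [pvViol]
  rw [if_pos (show (r - (r + 2)).natAbs + (c - c).natAbs ≤ 2 by omega),
    if_neg (show ¬(r = r + 2) by omega), if_pos rfl]
  rw [show min r (r + 2) = r by omega, show max r (r + 2) = r + 2 by omega,
    PySem.List.pyRange_one_cons (by omega), PySem.List.pyRange_one_cons (by omega),
    PySem.List.pyRange_one_eq_nil (show (r + 2 : Int) ≤ r + 1 + 1 by omega)]
  by_cases hx : pvCell place (r + 1) c = 'X' <;> simp [hx, hP]

theorem pvViol_diag1 (place : List String) (r c : Int) :
    pvViol place (r, c) (r + 1, c + 1) = true ↔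
      (pvCell place r (c + 1) = 'O' ∨ pvCell place (r + 1) c = 'O') := by
  dsimp only [pvViol]
  rw [if_pos (show (r - (r + 1)).natAbs + (c - (c + 1)).natAbs ≤ 2 by omega),
    if_neg (show ¬(r = r + 1) by omega), if_neg (show ¬(c = c + 1) by omega)]
  simp

theorem pvViol_diag2 (place : List String) (r c : Int) :
    pvViol place (r, c) (r + 1, c - 1) = true ↔
      (pvCell place r (c - 1) = 'O' ∨ pvCell place (r + 1) c = 'O') := by
  dsimp only [pvViol]
  rw [if_pos (show (r - (r + 1)).natAbs + (c - (c - 1)).natAbs ≤ 2 by omega),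
    if_neg (show ¬(r = r + 1) by omega), if_neg (show ¬(c = c - 1) by omega)]
  simp

-- primed versions taking the endpoints with arithmetic side equations
theorem pvViol_row1' (place : List String) (r c1 c2 : Int) (h : c2 = c1 + 1)
    (hP : pvCell place r c1 = 'P') : pvViol place (r, c1) (r, c2) = true := by
  subst h; exact pvViol_row1 place r c1 hP

theorem pvViol_row2' (place : List String) (r c1 c2 cm : Int) (h : c2 = c1 + 2)
    (hm : cm = c1 + 1) (hP : pvCell place r c1 = 'P') :
    pvViol place (r, c1) (r, c2) = true ↔ ¬ pvCell place r cm = 'X' := by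
  subst h; subst hm; exact pvViol_row2 place r c1 hP

theorem pvViol_col1' (place : List String) (r1 r2 c : Int) (h : r2 = r1 + 1)
    (hP : pvCell place r1 c = 'P') : pvViol place (r1, c) (r2, c) = true := by
  subst h; exact pvViol_col1 place r1 c hP

theorem pvViol_col2' (place : List String) (r1 r2 rm c : Int) (h : r2 = r1 + 2)
    (hm : rm = r1 + 1) (hP : pvCell place r1 c = 'P') :
    pvViol place (r1, c) (r2, c) = true ↔ ¬ pvCell place rm c = 'X' := by
  subst h; subst hm; exact pvViol_col2 place r1 c hP

theorem pvViol_diag1' (place : List String) (r1 r2 c1 c2 : Int) (hr : r2 = r1 + 1)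
    (hc : c2 = c1 + 1) :
    pvViol place (r1, c1) (r2, c2) = true ↔
      (pvCell place r1 c2 = 'O' ∨ pvCell place r2 c1 = 'O') := by
  subst hr; subst hc; exact pvViol_diag1 place r1 c1

theorem pvViol_diag2' (place : List String) (r1 r2 c1 c2 : Int) (hr : r2 = r1 + 1)
    (hc : c2 = c1 - 1) :
    pvViol place (r1, c1) (r2, c2) = true ↔
      (pvCell place r1 c2 = 'O' ∨ pvCell place r2 c1 = 'O') := by
  subst hr; subst hc; exact pvViol_diag2 place r1 c1

-- A's nested index loop over a lex-sorted duplicate-free list finds a violating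
-- ordered pair iff one exists among the members
set_option maxHeartbeats 1000000 in
theorem pvStepA (place : List String) (L : List (Int × Int))
    (hpw : L.Pairwise pvLex) :
    (((PySem.List.pyRange 0 (L.length : Int) 1).any (fun i =>
      (PySem.List.pyRange (i + 1) (L.length : Int) 1).any (fun j =>
        pvViol place (PySem.List.pyGetD L i (0, 0)) (PySem.List.pyGetD L j (0, 0))))) = true) ↔
      ∃ p q, p ∈ L ∧ q ∈ L ∧ pvLex p q ∧ pvViol place p q = true := by
  simp only [List.any_eq_true, PySem.List.mem_pyRange_one]
  constructor
  · rintro ⟨i, ⟨hi0, hin⟩, j, ⟨hj1, hjn⟩, hv⟩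
    have hiN : i.toNat < L.length := by omega
    have hjN : j.toNat < L.length := by omega
    rw [PySem.List.pyGetD_eq_getElem L (0, 0) hi0 hin,
      PySem.List.pyGetD_eq_getElem L (0, 0) (by omega) hjn] at hv
    exact ⟨L[i.toNat], L[j.toNat], List.getElem_mem _, List.getElem_mem _,
      (List.pairwise_iff_getElem.1 hpw) _ _ hiN hjN (by omega), hv⟩
  · rintro ⟨p, q, hp, hq, hlex, hv⟩
    obtain ⟨a, ha, hpa⟩ := List.mem_iff_getElem.1 hp
    obtain ⟨b, hb, hqb⟩ := List.mem_iff_getElem.1 hq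
    have hab : a < b := by
      rcases lt_trichotomy a b with h | h | h
      · exact h
      · exfalso
        subst h
        rw [hpa] at hqb
        subst hqb
        simp only [pvLex] at hlex
        omega
      · exfalso
        have h2 := (List.pairwise_iff_getElem.1 hpw) _ _ hb ha h
        rw [hpa, hqb] at h2
        simp only [pvLex] at h2 hlex
        omega
    refine ⟨(a : Int), ⟨by omega, by omega⟩, (b : Int), ⟨by omega, by omega⟩, ?_⟩
    rw [PySem.List.pyGetD_eq_getElem L (0, 0) (by omega) (by omega),
      PySem.List.pyGetD_eq_getElem L (0, 0) (by omega) (by omega)]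
    simp only [Int.toNat_natCast]
    rw [hpa, hqb]
    exact hv

-- a violating ordered pair exists iff some row has a person hit by B's backward probe
set_option maxHeartbeats 1000000 in
theorem pvBridge (place : List String) :
    (∃ p q, p ∈ pvCells place ∧ q ∈ pvCells place ∧ pvLex p q ∧
      pvViol place p q = true) ↔
    ∃ r : Int, (0 : Int) ≤ r ∧
      pvRowViol place ((PySem.List.pyGetD place 0 "").length : Int) r := by
  constructor
  · rintro ⟨⟨r1, c1⟩, ⟨r2, c2⟩, hp, hq, hlex, hv⟩
    obtain ⟨hr10, hr1n, hc1⟩ := (pvCells_mem place r1 c1).1 hp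
    obtain ⟨hr20, hr2n, hc2⟩ := (pvCells_mem place r2 c2).1 hq
    have hP : pvCell place r1 c1 = 'P' := ((mem_pvRS place _ r1 c1).1 hc1).2.2
    have hd : (r1 - r2).natAbs + (c1 - c2).natAbs ≤ 2 := by
      by_contra hd
      simp only [pvViol] at hv
      rw [if_neg hd] at hv
      cases hv
    simp only [pvLex] at hlex
    have hcases : (r2 = r1 ∧ c2 = c1 + 1) ∨ (r2 = r1 ∧ c2 = c1 + 2) ∨
        (r2 = r1 + 1 ∧ c2 = c1) ∨ (r2 = r1 + 2 ∧ c2 = c1) ∨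
        (r2 = r1 + 1 ∧ c2 = c1 + 1) ∨ (r2 = r1 + 1 ∧ c2 = c1 - 1) := by omega
    have hRSg1 : pvRSg place ((PySem.List.pyGetD place 0 "").length : Int) r1 =
        pvRS place ((PySem.List.pyGetD place 0 "").length : Int) r1 := if_pos hr10
    rcases hcases with ⟨h1, h2⟩ | ⟨h1, h2⟩ | ⟨h1, h2⟩ | ⟨h1, h2⟩ | ⟨h1, h2⟩ | ⟨h1, h2⟩ <;>
      rw [h1, h2] at hv hc2 hq
    · exact ⟨r1, hr10, c1 + 1, hc2, Or.inl (by rwa [show c1 + 1 - 1 = c1 by ring])⟩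
    · have hx := (pvViol_row2 place r1 c1 hP).1 hv
      refine ⟨r1, hr10, c1 + 2, hc2, Or.inr (Or.inl ⟨?_, ?_⟩)⟩
      · rwa [show c1 + 2 - 2 = c1 by ring]
      · rwa [show c1 + 2 - 1 = c1 + 1 by ring]
    · refine ⟨r1 + 1, by omega, c1, hc2, Or.inr (Or.inr (Or.inl ?_))⟩
      rw [show r1 + 1 - 1 = r1 by ring, hRSg1]
      exact hc1
    · have hx := (pvViol_col2 place r1 c1 hP).1 hv
      refine ⟨r1 + 2, by omega, c1, hc2, Or.inr (Or.inr (Or.inr (Or.inl ⟨?_, ?_⟩)))⟩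
      · rw [show r1 + 2 - 2 = r1 by ring, hRSg1]
        exact hc1
      · rwa [show r1 + 2 - 1 = r1 + 1 by ring]
    · have hO := (pvViol_diag1 place r1 c1).1 hv
      refine ⟨r1 + 1, by omega, c1 + 1, hc2,
        Or.inr (Or.inr (Or.inr (Or.inr (Or.inl ⟨?_, ?_⟩))))⟩
      · rw [show r1 + 1 - 1 = r1 by ring, show c1 + 1 - 1 = c1 by ring, hRSg1]
        exact hc1
      · rw [show c1 + 1 - 1 = c1 by ring, show r1 + 1 - 1 = r1 by ring]
        exact hO.symm
    · have hO := (pvViol_diag2 place r1 c1).1 hv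
      refine ⟨r1 + 1, by omega, c1 - 1, hc2,
        Or.inr (Or.inr (Or.inr (Or.inr (Or.inr ⟨?_, ?_⟩))))⟩
      · rw [show r1 + 1 - 1 = r1 by ring, show c1 - 1 + 1 = c1 by ring, hRSg1]
        exact hc1
      · rw [show c1 - 1 + 1 = c1 by ring, show r1 + 1 - 1 = r1 by ring]
        exact hO.symm
  · rintro ⟨r, hr0, c, hc, hhit⟩
    have hcP : pvCell place r c = 'P' := ((mem_pvRS place _ r c).1 hc).2.2
    have hrn : r < (place.length : Int) := by
      by_contra hrn
      rw [pvCell_high place r c (by omega)] at hcP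
      exact absurd hcP (by decide)
    have hqmem : (r, c) ∈ pvCells place := (pvCells_mem place r c).2 ⟨hr0, hrn, hc⟩
    have memg : ∀ r' c', c' ∈ pvRSg place ((PySem.List.pyGetD place 0 "").length : Int) r' →
        0 ≤ r' ∧ c' ∈ pvRS place ((PySem.List.pyGetD place 0 "").length : Int) r' := by
      intro r' c' h
      unfold pvRSg at h
      by_cases h0 : (0 : Int) ≤ r'
      · rw [if_pos h0] at h
        exact ⟨h0, h⟩
      · rw [if_neg h0] at h
        cases h
    have memRow : ∀ r' c', c' ∈ pvRS place ((PySem.List.pyGetD place 0 "").length : Int) r' →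
        0 ≤ r' → r' < (place.length : Int) → (r', c') ∈ pvCells place := by
      intro r' c' h h0 h1
      exact (pvCells_mem place r' c').2 ⟨h0, h1, h⟩
    rcases hhit with h | ⟨h, hx⟩ | h | ⟨h, hx⟩ | ⟨h, hO⟩ | ⟨h, hO⟩
    · have hpP := ((mem_pvRS place _ r (c - 1)).1 h).2.2
      exact ⟨(r, c - 1), (r, c), memRow r (c - 1) h hr0 hrn, hqmem,
        Or.inr ⟨rfl, by omega⟩, pvViol_row1' place r (c - 1) c (by ring) hpP⟩
    · have hpP := ((mem_pvRS place _ r (c - 2)).1 h).2.2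
      exact ⟨(r, c - 2), (r, c), memRow r (c - 2) h hr0 hrn, hqmem,
        Or.inr ⟨rfl, by omega⟩,
        (pvViol_row2' place r (c - 2) c (c - 1) (by ring) (by ring) hpP).2 hx⟩
    · obtain ⟨h0, hmem⟩ := memg _ _ h
      have hpP := ((mem_pvRS place _ (r - 1) c).1 hmem).2.2
      exact ⟨(r - 1, c), (r, c), memRow (r - 1) c hmem h0 (by omega), hqmem,
        Or.inl (by omega), pvViol_col1' place (r - 1) r c (by ring) hpP⟩
    · obtain ⟨h0, hmem⟩ := memg _ _ h
      have hpP := ((mem_pvRS place _ (r - 2) c).1 hmem).2.2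
      exact ⟨(r - 2, c), (r, c), memRow (r - 2) c hmem h0 (by omega), hqmem,
        Or.inl (by omega),
        (pvViol_col2' place (r - 2) r (r - 1) c (by ring) (by ring) hpP).2 hx⟩
    · obtain ⟨h0, hmem⟩ := memg _ _ h
      have hpP := ((mem_pvRS place _ (r - 1) (c - 1)).1 hmem).2.2
      exact ⟨(r - 1, c - 1), (r, c), memRow (r - 1) (c - 1) hmem h0 (by omega), hqmem,
        Or.inl (by omega),
        (pvViol_diag1' place (r - 1) r (c - 1) c (by ring) (by ring)).2 hO.symm⟩
    · obtain ⟨h0, hmem⟩ := memg _ _ h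
      have hpP := ((mem_pvRS place _ (r - 1) (c + 1)).1 hmem).2.2
      exact ⟨(r - 1, c + 1), (r, c), memRow (r - 1) (c + 1) hmem h0 (by omega), hqmem,
        Or.inl (by omega),
        (pvViol_diag2' place (r - 1) r (c + 1) c (by ring) (by ring)).2 hO.symm⟩

-- B's streaming scan finds a hit iff some row at or after k has one
set_option maxHeartbeats 1000000 in
theorem pvScan_iff (place : List String) (W : Int) :
    ∀ (rest : List String) (k : Nat), rest = place.drop k →
      (pvScan place W (pvRSg place W ((k : Int) - 2)) (pvRSg place W ((k : Int) - 1))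
        (k : Int) rest = true ↔
        ∃ r : Int, (k : Int) ≤ r ∧ pvRowViol place W r) := by
  intro rest
  induction rest with
  | nil =>
    intro k hk
    apply iff_of_false (by simp [pvScan])
    rintro ⟨r, hr, c, hc, _⟩
    have hn : place.length ≤ k := List.drop_eq_nil_iff.1 hk.symm
    have hcP : pvCell place r c = 'P' := ((mem_pvRS place W r c).1 hc).2.2
    rw [pvCell_high place r c (by exact_mod_cast le_trans (by exact_mod_cast hn) hr)] at hcP
    exact absurd hcP (by decide)
  | cons row rest' ih =>
    intro k hk
    have hget : place[k]? = some row := by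
      have h0 : (place.drop k)[0]? = place[k + 0]? := List.getElem?_drop
      rw [← hk] at h0
      simpa using h0.symm
    have hrest' : rest' = place.drop (k + 1) := by
      have h1 : List.drop 1 (List.drop k place) = List.drop (k + 1) place := List.drop_drop
      rw [← hk] at h1
      simpa using h1
    have hrow : PySem.List.pyGetD place (k : Int) "" = row := by
      rw [PySem.List.pyGetD_natCast]
      simp [List.getD_eq_getElem?_getD, hget]
    have hcur : pvRowSet W row = pvRS place W (k : Int) := by
      unfold pvRowSet pvRS
      rw [PySem.Set.ofList_eq_self_of_nodup _
        ((PySem.List.nodup_pyRange_one 0 W).filter _)]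
      unfold pvCell
      rw [hrow]
    have hcell : ∀ c', PySem.List.pyGetD row.toList c' ' ' = pvCell place (k : Int) c' := by
      intro c'
      unfold pvCell
      rw [hrow]
    have hhit : ∀ c, pvHit place (k : Int) row (pvRS place W (k : Int))
        (pvRSg place W ((k : Int) - 1)) (pvRSg place W ((k : Int) - 2)) c = true ↔
        pvHitP place W (k : Int) c := by
      intro c
      simp only [pvHit, pvHitP, Bool.or_eq_true, Bool.and_eq_true, Bool.not_eq_eq_eq_not,
        Bool.not_true, decide_eq_false_iff_not, decide_eq_true_eq, List.contains_iff_mem,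
        hcell]
      tauto
    show (if (pvRowSet W row).any (fun c => pvHit place (k : Int) row (pvRowSet W row)
        (pvRSg place W ((k : Int) - 1)) (pvRSg place W ((k : Int) - 2)) c) then true
      else pvScan place W (pvRSg place W ((k : Int) - 1)) (pvRowSet W row)
        ((k : Int) + 1) rest') = true ↔ _
    rw [hcur]
    by_cases hC : (pvRS place W (k : Int)).any (fun c => pvHit place (k : Int) row
        (pvRS place W (k : Int)) (pvRSg place W ((k : Int) - 1))
        (pvRSg place W ((k : Int) - 2)) c) = true
    · rw [if_pos hC]
      apply iff_of_true rfl
      obtain ⟨c, hcmem, hhitb⟩ := List.any_eq_true.1 hC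
      exact ⟨(k : Int), le_refl _, c, hcmem, (hhit c).1 hhitb⟩
    · rw [if_neg hC]
      have hnotk : ¬ pvRowViol place W (k : Int) := by
        rintro ⟨c, hcmem, hh⟩
        exact hC (List.any_eq_true.2 ⟨c, hcmem, (hhit c).2 hh⟩)
      have ihk := ih (k + 1) hrest'
      rw [show ((k + 1 : Nat) : Int) = (k : Int) + 1 by push_cast; ring] at ihk
      rw [show (k : Int) + 1 - 2 = (k : Int) - 1 by ring,
        show (k : Int) + 1 - 1 = (k : Int) by ring,
        show pvRSg place W (k : Int) = pvRS place W (k : Int) from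
          if_pos (Int.natCast_nonneg k)] at ihk
      rw [ihk]
      constructor
      · rintro ⟨r, hr, hv⟩
        exact ⟨r, by omega, hv⟩
      · rintro ⟨r, hr, hv⟩
        by_cases hrk : r = (k : Int)
        · subst hrk
          exact absurd hv hnotk
        · exact ⟨r, by omega, hv⟩

-- ===== VERDICT (by name: the statement is the Claim_ definition above) =====
set_option maxHeartbeats 1000000 in
theorem check_p_spec : Claim_equal_check_p := by
  intro place _hd _hpre
  unfold Spec_check_p check_p check_p_alt
  rw [pvPersons_eq_cells]
  have hW : ((place.headD "").length : Int) =
      ((PySem.List.pyGetD place 0 "").length : Int) := by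
    cases place <;> simp [PySem.List.pyGetD_zero]
  rw [hW]
  have hscan := pvScan_iff place ((PySem.List.pyGetD place 0 "").length : Int)
    place 0 (by simp)
  rw [show ((0 : Nat) : Int) = 0 by simp] at hscan
  rw [show pvRSg place ((PySem.List.pyGetD place 0 "").length : Int) ((0 : Int) - 2) = []
      from if_neg (by omega),
    show pvRSg place ((PySem.List.pyGetD place 0 "").length : Int) ((0 : Int) - 1) = []
      from if_neg (by omega)] at hscan
  have key := (pvStepA place (pvCells place) (pvCells_pairwise place)).trans
    ((pvBridge place).trans hscan.symm)
  rw [Bool.eq_iff_iff.mpr key]
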